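-- pv_equiv track=rewrite | github.com/modm-io/modm | tools/scripts/copyright.py | format_copyright_header
-- ===== SOURCE A (Python) =====
-- license_texts = {
--     "MPL-2.0": """\
-- This file is part of the modm project.
--
-- This Source Code Form is subject to the terms of the Mozilla Public
-- License, v. 2.0. If a copy of the MPL was not distributed with this
-- file, You can obtain one at http://mozilla.org/MPL/2.0/.\
-- """,
-- }
--
-- copyright_format = "Copyright (c) {years}, {author}"
--
-- def compactify_years(years):
--     # if len(years) == 1: return map(str, years);
--     streaks = []
--     streak = []
--     for year in years:
--         if len(streak) == 0 or year == (streak[-1] + 1):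
--             streak.append(year)
--         else:
--             streaks.append(streak)
--             streak = [year]
--     streaks.append(streak)
--     streaks = [(s[0], s[-1]) for s in streaks]
--     years = [("{}-{}".format(s[0], s[1]) if s[0] != s[1] else str(s[0])) for s in streaks]
--     return years
--
-- def format_copyright_header(authors, style):
--     lines = []
--     # sort names by start of copyright date, then alphabetically
--     for author in sorted(authors.keys(), key=lambda a: (min(authors[a]), max(authors[a]), a)):
--         years = compactify_years(authors[author])
--         string = copyright_format.format(years=", ".join(years), author=author)
--         lines.append(string)
--     # add a newline after copyright
--     lines.append("")
--     # add license
--     lines.extend(license_texts["MPL-2.0"].splitlines())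
--     # wrap in style
--     slines = []
--     for i, line in enumerate(lines):
--         if i == 0:
--             slines.append(style[0] + line);
--         elif i == (len(lines) - 1):
--             slines.append(style[1] + line + style[2])
--         else:
--             slines.append(style[1] + line)
--     # strip all trailing whitespace
--     lines = [l.rstrip() for l in slines]
--     # return the text
--     return "\n".join(lines)
-- ===== SOURCE B (Python) =====
-- license_texts = {
--     "MPL-2.0": """\
-- This file is part of the modm project.
--
-- This Source Code Form is subject to the terms of the Mozilla Public
-- License, v. 2.0. If a copy of the MPL was not distributed with this
-- file, You can obtain one at http://mozilla.org/MPL/2.0/.\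
-- """,
-- }
--
-- copyright_format = "Copyright (c) {years}, {author}"
--
-- def compactify_years(years):
--     # peel the maximal leading run of consecutive years, format it, recurse on the rest
--     if not years:
--         return []
--     first = years[0]
--     last = first
--     k = 1
--     while k < len(years) and years[k] == last + 1:
--         last = years[k]
--         k += 1
--     head = str(first) if first == last else "{}-{}".format(first, last)
--     return [head] + compactify_years(years[k:])
--
-- def format_copyright_header(authors, style):
--     body = [copyright_format.format(years=", ".join(compactify_years(authors[a])), author=a)
--             for a in sorted(authors.keys(), key=lambda a: (min(authors[a]), max(authors[a]), a))]
--     lines = body + [""] + license_texts["MPL-2.0"].splitlines()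
--     first, rest = lines[0], lines[1:]
--     wrapped = ([style[0] + first]
--                + [style[1] + l for l in rest[:-1]]
--                + [style[1] + rest[-1] + style[2]])
--     return "\n".join(l.rstrip() for l in wrapped)
-- ===== Notes on version B (the rewrite author's own statement) =====
-- stated objective: alternative
-- what changed: compactify_years is rewritten to recursively peel the maximal leading run of consecutive years (no streak-list accumulator and no post-processing passes), and the wrap step builds the styled first/middle/last lines explicitly instead of testing each index against 0 and len-1 inside an enumerate loop.
import Mathlib
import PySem

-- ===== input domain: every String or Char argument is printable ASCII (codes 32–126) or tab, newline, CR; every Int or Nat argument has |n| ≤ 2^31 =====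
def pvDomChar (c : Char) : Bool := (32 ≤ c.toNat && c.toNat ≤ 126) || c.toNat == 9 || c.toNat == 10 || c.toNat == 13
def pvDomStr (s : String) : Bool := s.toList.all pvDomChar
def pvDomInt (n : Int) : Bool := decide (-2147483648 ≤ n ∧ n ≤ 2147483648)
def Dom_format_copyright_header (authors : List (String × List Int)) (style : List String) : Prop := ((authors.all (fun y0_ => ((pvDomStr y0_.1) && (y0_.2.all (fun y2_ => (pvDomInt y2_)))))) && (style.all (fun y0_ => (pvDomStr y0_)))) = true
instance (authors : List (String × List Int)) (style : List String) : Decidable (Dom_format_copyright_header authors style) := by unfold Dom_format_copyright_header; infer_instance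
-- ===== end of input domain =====

-- B wraps the header by splitting the line list into first / middle / last explicitly and
-- compactifies year runs by recursively peeling the maximal leading run (no streak-list
-- accumulator, no index-vs-length tests inside the wrap loop); objective: alternative
-- decomposition of the same cost — not claimed faster.

-- ===== PORT A =====
-- shared module constants of Source A (used verbatim by both Pythons)
def pvLicenseText : String := "This file is part of the modm project.\n\nThis Source Code Form is subject to the terms of the Mozilla Public\nLicense, v. 2.0. If a copy of the MPL was not distributed with this\nfile, You can obtain one at http://mozilla.org/MPL/2.0/."

def pvCopyrightLine (years author : String) : String :=
  "Copyright (c) " ++ years ++ ", " ++ author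

-- sort key (min(authors[a]), max(authors[a]), a) — Python tuple comparison is the lexicographic order
def pvSortKey (authors : List (String × List Int)) (a : String) : Lex (Int × Lex (Int × String)) :=
  toLex ((PySem.List.min? (PySem.Dict.getD ⟨authors⟩ a []) (fun y => y)).getD 0,
    toLex ((PySem.List.max? (PySem.Dict.getD ⟨authors⟩ a []) (fun y => y)).getD 0, a))

-- loop body of A's compactify_years (streak accumulator)
def pvStepA (p : List (List Int) × List Int) (year : Int) : List (List Int) × List Int :=
  if p.2.length = 0 ∨ year = PySem.List.pyGetD p.2 (-1) 0 + 1
  then (p.1, p.2 ++ [year])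
  else (p.1 ++ [p.2], [year])

def pyCompactifyYears (years : List Int) : List String :=
  (((years.foldl pvStepA ([], [])).1 ++ [(years.foldl pvStepA ([], [])).2]).map
      (fun s => (PySem.List.pyGetD s 0 0, PySem.List.pyGetD s (-1) 0))).map
    (fun s =>
      if s.1 ≠ s.2 then PySem.Int.toStr s.1 ++ "-" ++ PySem.Int.toStr s.2 else PySem.Int.toStr s.1)

-- the 'lines' list built by the first three statements of A
def pvLinesA (authors : List (String × List Int)) : List String :=
  ((PySem.List.sorted (PySem.Dict.mk authors).keys (pvSortKey authors) false).foldl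
      (fun lines a =>
        lines ++ [pvCopyrightLine (PySem.Str.join ", " (pyCompactifyYears (PySem.Dict.getD ⟨authors⟩ a []))) a]) [])
    ++ [""] ++ PySem.Str.splitlines pvLicenseText

-- A's enumerate loop producing 'slines'
def pvWrapA (style : List String) (lines : List String) : List String :=
  (PySem.List.enumerate lines 0).foldl (fun sl p =>
      if p.1 = 0 then sl ++ [PySem.List.pyGetD style 0 "" ++ p.2]
      else if p.1 = (lines.length : Int) - 1 then
        sl ++ [PySem.List.pyGetD style 1 "" ++ p.2 ++ PySem.List.pyGetD style 2 ""]
      else sl ++ [PySem.List.pyGetD style 1 "" ++ p.2]) []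

def format_copyright_header (authors : List (String × List Int)) (style : List String) : String :=
  PySem.Str.join "\n" ((pvWrapA style (pvLinesA authors)).map PySem.Str.rstrip)

-- ===== PORT B =====
-- B's inner while loop: consume the leading run of consecutive years, return (last year of run, remainder)
def pvPeelRun (last : Int) (ys : List Int) : Int × List Int :=
  match ys with
  | [] => (last, [])
  | y :: t => if y = last + 1 then pvPeelRun y t else (last, y :: t)

theorem pvPeelRun_len (last : Int) (ys : List Int) : (pvPeelRun last ys).2.length ≤ ys.length := by
  induction ys generalizing last with
  | nil => simp [pvPeelRun]
  | cons y t ih =>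
    simp only [pvPeelRun]
    split
    · exact le_trans (ih y) (by simp)
    · simp

def pyCompactifyYearsAlt : List Int → List String
  | [] => []
  | y :: t =>
    let p := pvPeelRun y t
    (if y = p.1 then PySem.Int.toStr y else PySem.Int.toStr y ++ "-" ++ PySem.Int.toStr p.1)
      :: pyCompactifyYearsAlt p.2
termination_by ys => ys.length
decreasing_by
  have := pvPeelRun_len y t
  simp at *; omega

-- B's body comprehension
def pvBodyB (authors : List (String × List Int)) : List String :=
  (PySem.List.sorted (PySem.Dict.mk authors).keys (pvSortKey authors) false).map
    (fun a => pvCopyrightLine (PySem.Str.join ", " (pyCompactifyYearsAlt (PySem.Dict.getD ⟨authors⟩ a []))) a)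

def format_copyright_header_alt (authors : List (String × List Int)) (style : List String) : String :=
  match pvBodyB authors ++ [""] ++ PySem.Str.splitlines pvLicenseText with
  | [] => ""  -- unreachable: the line list always contains the "" separator line
  | first :: rest =>
    PySem.Str.join "\n"
      (((PySem.List.pyGetD style 0 "" ++ first)
        :: ((PySem.List.slice rest none (some (-1))).map (fun l => PySem.List.pyGetD style 1 "" ++ l)
            ++ [PySem.List.pyGetD style 1 "" ++ PySem.List.pyGetD rest (-1) "" ++ PySem.List.pyGetD style 2 ""])).map
        PySem.Str.rstrip)

-- ===== PRECONDITION & SPEC =====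
-- Pre_ excludes exactly the inputs where the Python raises: an author with an empty year list
-- (min()/max() of an empty sequence → ValueError), fewer than 3 style strings (IndexError on
-- style[0]/style[1]/style[2]), and duplicate author names (the argument is a dict, whose keys
-- are distinct by representation).
def Pre_format_copyright_header (authors : List (String × List Int)) (style : List String) : Prop :=
  (authors.map Prod.fst).Nodup ∧ (∀ p ∈ authors, p.2 ≠ []) ∧ 3 ≤ style.length
instance (authors : List (String × List Int)) (style : List String) : Decidable (Pre_format_copyright_header authors style) := by unfold Pre_format_copyright_header; infer_instance

def pvWitness_format_copyright_header : (List (String × List Int)) × List String :=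
  ([("Alice", [2010, 2011, 2014]), ("Bob", [2009])], ["/* ", " * ", " */"])

def Spec_format_copyright_header (authors : List (String × List Int)) (style : List String) (out : String) : Prop := out = format_copyright_header_alt authors style
instance (authors : List (String × List Int)) (style : List String) (out : String) : Decidable (Spec_format_copyright_header authors style out) := by unfold Spec_format_copyright_header; infer_instance

-- ===== CLAIM (what is proved, stated in full; the proofs are below) =====
def Claim_equal_format_copyright_header : Prop := ∀ (authors : List (String × List Int)) (style : List String), Dom_format_copyright_header authors style → Pre_format_copyright_header authors style → Spec_format_copyright_header authors style (format_copyright_header authors style)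

-- ===== LEMMAS AND PROOFS =====

-- the element produced by A's wrap loop at index p.1 (n = length of the line list)
def pvWrapF (style : List String) (n : Int) (p : Int × String) : String :=
  if p.1 = 0 then PySem.List.pyGetD style 0 "" ++ p.2
  else if p.1 = n - 1 then PySem.List.pyGetD style 1 "" ++ p.2 ++ PySem.List.pyGetD style 2 ""
  else PySem.List.pyGetD style 1 "" ++ p.2

-- the two branch orders of the run formatter agree
theorem pvFmt_flip (a b : Int) :
    (if a ≠ b then PySem.Int.toStr a ++ "-" ++ PySem.Int.toStr b else PySem.Int.toStr a)
      = (if a = b then PySem.Int.toStr a else PySem.Int.toStr a ++ "-" ++ PySem.Int.toStr b) := by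
  by_cases h : a = b <;> simp [h]

theorem pvGetD_zero_append (s : List Int) (y : Int) (h : s ≠ []) :
    PySem.List.pyGetD (s ++ [y]) 0 0 = PySem.List.pyGetD s 0 0 := by
  cases s with
  | nil => exact absurd rfl h
  | cons a t => simp [PySem.List.pyGetD_zero]

-- invariant of A's streak loop: with a nonempty current streak it produces the head-run
-- format followed by B's compactification of the remainder
theorem pvLoopA (rest : List Int) : ∀ (ss : List (List Int)) (s : List Int), s ≠ [] →
    ((rest.foldl pvStepA (ss, s)).1 ++ [(rest.foldl pvStepA (ss, s)).2]).map
        (fun s => if PySem.List.pyGetD s 0 0 ≠ PySem.List.pyGetD s (-1) 0 then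
            PySem.Int.toStr (PySem.List.pyGetD s 0 0) ++ "-" ++ PySem.Int.toStr (PySem.List.pyGetD s (-1) 0)
          else PySem.Int.toStr (PySem.List.pyGetD s 0 0))
      = ss.map (fun s => if PySem.List.pyGetD s 0 0 ≠ PySem.List.pyGetD s (-1) 0 then
            PySem.Int.toStr (PySem.List.pyGetD s 0 0) ++ "-" ++ PySem.Int.toStr (PySem.List.pyGetD s (-1) 0)
          else PySem.Int.toStr (PySem.List.pyGetD s 0 0))
        ++ (if PySem.List.pyGetD s 0 0 ≠ (pvPeelRun (PySem.List.pyGetD s (-1) 0) rest).1 then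
              PySem.Int.toStr (PySem.List.pyGetD s 0 0) ++ "-" ++ PySem.Int.toStr (pvPeelRun (PySem.List.pyGetD s (-1) 0) rest).1
            else PySem.Int.toStr (PySem.List.pyGetD s 0 0))
          :: pyCompactifyYearsAlt (pvPeelRun (PySem.List.pyGetD s (-1) 0) rest).2 := by
  induction rest with
  | nil => intro ss s hs; simp [pvPeelRun, pyCompactifyYearsAlt]
  | cons y t ih =>
    intro ss s hs
    have hlen : ¬ s.length = 0 := by simpa using hs
    by_cases hy : y = PySem.List.pyGetD s (-1) 0 + 1
    · have hstep : pvStepA (ss, s) y = (ss, s ++ [y]) := by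
        simp [pvStepA, hlen, hy]
      rw [List.foldl_cons, hstep, ih ss (s ++ [y]) (by simp),
        PySem.List.pyGetD_neg_one_append_singleton, pvGetD_zero_append s y hs]
      have hpeel : pvPeelRun (PySem.List.pyGetD s (-1) 0) (y :: t) = pvPeelRun y t := by
        simp [pvPeelRun, hy]
      rw [hpeel]
    · have hstep : pvStepA (ss, s) y = (ss ++ [s], [y]) := by
        simp [pvStepA, hlen, hy]
      rw [List.foldl_cons, hstep, ih (ss ++ [s]) [y] (by simp)]
      have hpeel : pvPeelRun (PySem.List.pyGetD s (-1) 0) (y :: t) = (PySem.List.pyGetD s (-1) 0, y :: t) := by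
        simp [pvPeelRun, hy]
      rw [hpeel]
      have halt : pyCompactifyYearsAlt (y :: t)
          = (if y ≠ (pvPeelRun y t).1 then PySem.Int.toStr y ++ "-" ++ PySem.Int.toStr (pvPeelRun y t).1
              else PySem.Int.toStr y) :: pyCompactifyYearsAlt (pvPeelRun y t).2 := by
        rw [pyCompactifyYearsAlt, pvFmt_flip]
      rw [halt]
      have e1 : PySem.List.pyGetD [y] (-1) 0 = y := by
        rw [PySem.List.pyGetD_neg_one [y] 0 (by simp)]; simp
      have e2 : PySem.List.pyGetD [y] 0 0 = y := by simp [PySem.List.pyGetD_zero]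
      simp [e1, e2]

theorem pvCompact_eq (ys : List Int) (h : ys ≠ []) :
    pyCompactifyYears ys = pyCompactifyYearsAlt ys := by
  cases ys with
  | nil => exact absurd rfl h
  | cons y t =>
    have hstep : pvStepA ([], []) y = ([], [y]) := by simp [pvStepA]
    have halt : pyCompactifyYearsAlt (y :: t)
        = (if y ≠ (pvPeelRun y t).1 then PySem.Int.toStr y ++ "-" ++ PySem.Int.toStr (pvPeelRun y t).1
            else PySem.Int.toStr y) :: pyCompactifyYearsAlt (pvPeelRun y t).2 := by
      rw [pyCompactifyYearsAlt, pvFmt_flip]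
    simp only [pyCompactifyYears, List.foldl_cons, hstep, List.map_map, Function.comp_def]
    rw [pvLoopA t [] [y] (by simp), halt]
    have e1 : PySem.List.pyGetD [y] (-1) 0 = y := by
      rw [PySem.List.pyGetD_neg_one [y] 0 (by simp)]; simp
    have e2 : PySem.List.pyGetD [y] 0 0 = y := by simp [PySem.List.pyGetD_zero]
    simp [e1, e2]

-- tail of A's wrap loop as a map, starting at a positive index
theorem pvWrapTail (style : List String) :
    ∀ (rest : List String) (k n : Int) (hr : rest ≠ []), 0 < k → n = k + rest.length →
    (PySem.List.enumerate rest k).map (pvWrapF style n)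
      = rest.dropLast.map (fun l => PySem.List.pyGetD style 1 "" ++ l)
        ++ [PySem.List.pyGetD style 1 "" ++ rest.getLast hr ++ PySem.List.pyGetD style 2 ""] := by
  intro rest
  induction rest with
  | nil => intro k n hr; exact absurd rfl hr
  | cons x t ih =>
    intro k n _ hk hn
    cases t with
    | nil =>
      simp only [PySem.List.enumerate_cons, PySem.List.enumerate_nil, List.map_cons, List.map_nil]
      have h0 : ¬ k = 0 := by omega
      have h1 : k = n - 1 := by simp at hn; omega
      simp [pvWrapF, h0, ← h1]
    | cons b t' =>
      have hrec := ih (k + 1) n (by simp) (by omega) (by simp at hn ⊢; omega)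
      have h0 : ¬ k = 0 := by omega
      have h1 : ¬ k = n - 1 := by simp at hn; omega
      rw [PySem.List.enumerate_cons, List.map_cons, hrec]
      simp [pvWrapF, h0, h1, List.getLast_cons]

-- A's index-testing wrap loop equals B's first/middle/last decomposition
theorem pvWrap_eq (first : String) (rest : List String) (h : rest ≠ []) (style : List String) :
    pvWrapA style (first :: rest)
      = (PySem.List.pyGetD style 0 "" ++ first)
          :: ((PySem.List.slice rest none (some (-1))).map (fun l => PySem.List.pyGetD style 1 "" ++ l)
              ++ [PySem.List.pyGetD style 1 "" ++ PySem.List.pyGetD rest (-1) "" ++ PySem.List.pyGetD style 2 ""]) := by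
  have hstep : (fun (sl : List String) (p : Int × String) =>
      if p.1 = 0 then sl ++ [PySem.List.pyGetD style 0 "" ++ p.2]
      else if p.1 = ((first :: rest).length : Int) - 1 then
        sl ++ [PySem.List.pyGetD style 1 "" ++ p.2 ++ PySem.List.pyGetD style 2 ""]
      else sl ++ [PySem.List.pyGetD style 1 "" ++ p.2])
      = (fun sl p => sl ++ [pvWrapF style ((first :: rest).length : Int) p]) := by
    funext sl p
    simp only [pvWrapF]
    split_ifs <;> rfl
  rw [pvWrapA, hstep, PySem.List.foldl_append_singleton_eq_map, PySem.List.enumerate_cons, List.map_cons]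
  have htail := pvWrapTail style rest 1 (((first :: rest).length : Int)) h
      (by omega) (by simp; omega)
  simp only [zero_add]
  rw [PySem.List.slice_to_neg_one, PySem.List.pyGetD_neg_one rest "" h, htail]
  simp [pvWrapF]

-- under Pre_, every key of the dict looks up a nonempty year list
theorem pvGetD_ne_nil (authors : List (String × List Int)) (a : String)
    (ha : a ∈ (PySem.Dict.mk authors).keys) (hne : ∀ p ∈ authors, p.2 ≠ []) :
    PySem.Dict.getD ⟨authors⟩ a [] ≠ [] := by
  induction authors with
  | nil => simp [PySem.Dict.keys] at ha
  | cons p t ih =>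
    by_cases hk : p.1 = a
    · have : PySem.Dict.getD (PySem.Dict.mk (p :: t)) a [] = p.2 := by
        simp [PySem.Dict.getD, PySem.Dict.get?, List.find?, hk]
      rw [this]
      exact hne p (by simp)
    · have hbeq : (p.1 == a) = false := by simpa using hk
      have : PySem.Dict.getD (PySem.Dict.mk (p :: t)) a [] = PySem.Dict.getD (PySem.Dict.mk t) a [] := by
        simp [PySem.Dict.getD, PySem.Dict.get?, List.find?, hbeq]
      rw [this]
      have ha' : a ∈ (PySem.Dict.mk t).keys := by
        simp [PySem.Dict.keys] at ha ⊢
        rcases ha with h | h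
        · exact absurd h.symm (by simpa using hk)
        · exact h
      exact ih ha' (fun q hq => hne q (by simp [hq]))

set_option maxRecDepth 40000 in
theorem pvLicense_ne_nil : PySem.Str.splitlines pvLicenseText ≠ [] := by decide

-- under Pre_ the 'lines' lists of the two ports coincide
theorem pvLines_eq (authors : List (String × List Int)) (hne : ∀ p ∈ authors, p.2 ≠ []) :
    pvLinesA authors = pvBodyB authors ++ [""] ++ PySem.Str.splitlines pvLicenseText := by
  unfold pvLinesA pvBodyB
  rw [PySem.List.foldl_append_singleton_eq_map]
  simp only [List.nil_append]
  congr 2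
  refine List.map_congr_left (fun a haMem => ?_)
  have ha : a ∈ (PySem.Dict.mk authors).keys :=
    (PySem.List.mem_sorted _ _ _ _).1 haMem
  rw [pvCompact_eq _ (pvGetD_ne_nil authors a ha hne)]

-- ===== VERDICT (by name: the statement is the Claim_ definition above) =====
theorem format_copyright_header_spec : Claim_equal_format_copyright_header := by
  intro authors style _ hPre
  unfold Spec_format_copyright_header format_copyright_header format_copyright_header_alt
  obtain ⟨-, hne, -⟩ := hPre
  rw [pvLines_eq authors hne]
  cases hb : pvBodyB authors with
  | nil =>
    cases hL : PySem.Str.splitlines pvLicenseText with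
    | nil => exact absurd hL pvLicense_ne_nil
    | cons l0 lt =>
      simp only [List.nil_append, List.singleton_append]
      rw [pvWrap_eq "" (l0 :: lt) (by simp) style]
  | cons b0 bt =>
    simp only [List.cons_append, List.append_assoc, List.nil_append]
    rw [pvWrap_eq b0 (bt ++ "" :: PySem.Str.splitlines pvLicenseText) (by simp) style]
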